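-- pv_equiv track=rewrite | github.com/giuliamf/V-Competicao-Feminina-de-Programacao-da-UnB | Resolucoes/I-ProdutosCapilares.py | max_maciez
-- ===== SOURCE A (Python) =====
-- def max_maciez(N, M, V, C):
--     max_maciez_total = 0
--
--     # Percorre todas as subsequências possíveis de tamanho M
--     for start in range(N - M + 1):
--         maciez = 0
--         for i in range(M):
--             maciez += V[start + i] * C[i]
--         max_maciez_total = max(max_maciez_total, maciez)
--
--     return max_maciez_total
-- ===== SOURCE B (Python) =====
-- def max_maciez(N, M, V, C):
--     # Transposed accumulation: keep one running correlation per shift and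
--     # sweep the weights once, then take the max (floored at 0).
--     K = N - M + 1
--     if M <= 0 or K <= 0:
--         return 0
--     acc = [0] * K
--     for i in range(M):
--         ci = C[i]
--         acc = [a + ci * V[s + i] for s, a in enumerate(acc)]
--     return max(0, max(acc))
-- ===== Notes on version B (the rewrite author's own statement) =====
-- stated objective: alternative
-- what changed: B transposes the two loops: instead of recomputing each window's dot product from scratch, it keeps one running correlation per shift and sweeps the weight vector once, updating all shifts per weight, then takes max(0, max(acc)).
import Mathlib
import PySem

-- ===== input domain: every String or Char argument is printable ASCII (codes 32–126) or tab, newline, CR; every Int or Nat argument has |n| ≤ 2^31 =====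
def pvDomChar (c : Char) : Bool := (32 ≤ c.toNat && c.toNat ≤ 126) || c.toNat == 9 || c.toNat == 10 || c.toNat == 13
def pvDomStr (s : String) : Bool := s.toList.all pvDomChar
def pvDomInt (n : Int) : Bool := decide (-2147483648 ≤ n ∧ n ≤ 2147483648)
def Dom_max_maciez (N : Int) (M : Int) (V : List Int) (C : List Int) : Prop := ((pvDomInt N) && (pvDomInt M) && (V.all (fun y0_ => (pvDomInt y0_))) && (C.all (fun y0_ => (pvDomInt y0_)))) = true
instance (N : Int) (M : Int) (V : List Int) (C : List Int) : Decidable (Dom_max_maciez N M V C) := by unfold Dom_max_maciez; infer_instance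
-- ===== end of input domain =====

-- B replaces A's per-window dot products by a transposed accumulation (one running
-- correlation per shift, one sweep over the weights); objective: alternative structure, same cost.

-- ===== PORT A =====
-- V[start+i] / C[i] are ported with pyGetD (default 0): exact under Pre_, whose
-- in-range conditions exclude exactly the inputs where Python raises IndexError.
def max_maciez (N : Int) (M : Int) (V : List Int) (C : List Int) : Int :=
  (PySem.List.pyRange 0 (N - M + 1) 1).foldl
    (fun best start =>
      max best ((PySem.List.pyRange 0 M 1).foldl
        (fun mac i => mac + PySem.List.pyGetD V (start + i) 0 * PySem.List.pyGetD C i 0) 0))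
    0

-- ===== PORT B =====
-- literal port of Source B; max(acc) is PySem.List.max? (acc is nonempty here, so .getD 0 never fires)
def max_maciez_alt (N : Int) (M : Int) (V : List Int) (C : List Int) : Int :=
  let K := N - M + 1
  if M ≤ 0 ∨ K ≤ 0 then 0
  else
    let acc := (PySem.List.pyRange 0 M 1).foldl
      (fun acc i =>
        let ci := PySem.List.pyGetD C i 0
        (PySem.List.enumerate acc 0).map (fun p => p.2 + ci * PySem.List.pyGetD V (p.1 + i) 0))
      (List.replicate K.toNat 0)
    max 0 ((PySem.List.max? acc (fun y => y)).getD 0)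

-- ===== PRECONDITION & SPEC =====
-- Pre_ excludes exactly the inputs where A raises IndexError: a nonempty window range
-- with a positive M needs N ≤ len(V) and M ≤ len(C).
def Pre_max_maciez (N : Int) (M : Int) (V : List Int) (C : List Int) : Prop :=
  N - M + 1 ≤ 0 ∨ M ≤ 0 ∨ (N ≤ (V.length : Int) ∧ M ≤ (C.length : Int))
instance (N : Int) (M : Int) (V : List Int) (C : List Int) : Decidable (Pre_max_maciez N M V C) := by unfold Pre_max_maciez; infer_instance
def pvWitness_max_maciez : Int × Int × List Int × List Int := (4, 2, [1, -2, 3, 4], [2, 1])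

def Spec_max_maciez (N : Int) (M : Int) (V : List Int) (C : List Int) (out : Int) : Prop := out = max_maciez_alt N M V C
instance (N : Int) (M : Int) (V : List Int) (C : List Int) (out : Int) : Decidable (Spec_max_maciez N M V C out) := by unfold Spec_max_maciez; infer_instance

-- ===== CLAIM (what is proved, stated in full; the proofs are below) =====
def Claim_equal_max_maciez : Prop := ∀ (N : Int) (M : Int) (V : List Int) (C : List Int), Dom_max_maciez N M V C → Pre_max_maciez N M V C → Spec_max_maciez N M V C (max_maciez N M V C)

-- ===== LEMMAS AND PROOFS =====

-- A's window dot product at shift s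
def pvDot (M : Int) (V : List Int) (C : List Int) (s : Int) : Int :=
  (PySem.List.pyRange 0 M 1).foldl
    (fun mac i => mac + PySem.List.pyGetD V (s + i) 0 * PySem.List.pyGetD C i 0) 0

lemma pv_foldl_max_zero (l : List Int) (b : Int) (hb : 0 ≤ b) :
    l.foldl (fun acc (_ : Int) => max acc 0) b = b := by
  induction l generalizing b with
  | nil => rfl
  | cons x t ih => simpa [max_eq_left hb] using ih b hb

lemma pv_foldl_max_max (t : List Int) (a b : Int) :
    t.foldl max (max a b) = max a (t.foldl max b) := by
  induction t generalizing b with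
  | nil => rfl
  | cons c t ih => simp [List.foldl_cons, max_assoc, ih]

-- one update step of B on a list that is a map over the shift range
lemma pv_step (K : Int) (hK : 0 ≤ K) (g : Int → Int) (f : Int → Int) :
    (PySem.List.enumerate ((PySem.List.pyRange 0 K 1).map g) 0).map
      (fun p => p.2 + f p.1)
    = (PySem.List.pyRange 0 K 1).map (fun s => g s + f s) := by
  rw [PySem.List.enumerate_eq_map_pyRange _ 0]
  simp only [List.map_map, PySem.List.len_eq, List.length_map, PySem.List.length_pyRange_one]
  have hKK : (((K - 0).toNat : Int)) = K := by omega
  rw [hKK]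
  apply List.map_congr_left
  intro j hj
  rw [PySem.List.mem_pyRange_one] at hj
  simp [PySem.List.pyGetD_map_pyRange_of_nonneg g K j 0 hj.1 hj.2]

-- invariant of B's sweep over the weights
lemma pv_sweep (K : Int) (hK : 0 ≤ K) (V C : List Int) (is : List Int) (g : Int → Int) :
    is.foldl
      (fun acc i =>
        let ci := PySem.List.pyGetD C i 0
        (PySem.List.enumerate acc 0).map (fun p => p.2 + ci * PySem.List.pyGetD V (p.1 + i) 0))
      ((PySem.List.pyRange 0 K 1).map g)
    = (PySem.List.pyRange 0 K 1).map
        (fun s => is.foldl (fun a i => a + PySem.List.pyGetD C i 0 * PySem.List.pyGetD V (s + i) 0) (g s)) := by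
  induction is generalizing g with
  | nil => simp
  | cons i t ih =>
      simp only [List.foldl_cons]
      rw [pv_step K hK g (fun s => PySem.List.pyGetD C i 0 * PySem.List.pyGetD V (s + i) 0)]
      rw [ih (fun s => g s + PySem.List.pyGetD C i 0 * PySem.List.pyGetD V (s + i) 0)]

lemma pv_acc_eq_dot (K M : Int) (hK : 0 ≤ K) (V C : List Int) :
    (PySem.List.pyRange 0 M 1).foldl
      (fun acc i =>
        let ci := PySem.List.pyGetD C i 0
        (PySem.List.enumerate acc 0).map (fun p => p.2 + ci * PySem.List.pyGetD V (p.1 + i) 0))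
      (List.replicate K.toNat 0)
    = (PySem.List.pyRange 0 K 1).map (pvDot M V C) := by
  have hrep : (List.replicate K.toNat (0 : Int)) = (PySem.List.pyRange 0 K 1).map (fun _ => 0) := by
    rw [List.map_const', PySem.List.length_pyRange_one]
    congr 1; omega
  rw [hrep, pv_sweep K hK V C _ (fun _ => 0)]
  apply List.map_congr_left
  intro s _
  unfold pvDot
  induction (PySem.List.pyRange 0 M 1) using List.reverseRecOn with
  | nil => rfl
  | append_singleton t x ih => simp [List.foldl_append, mul_comm]

-- Pre_ guarantees the pyGetD defaults are never hit (port faithfulness); the equality itself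
-- holds for the ports on all inputs, so the proof needs no case split on it.
theorem max_maciez_spec_aux (N M : Int) (V C : List Int) :
    max_maciez N M V C = max_maciez_alt N M V C := by
  by_cases hK : N - M + 1 ≤ 0
  · unfold max_maciez max_maciez_alt
    rw [PySem.List.pyRange_one_eq_nil hK, if_pos (Or.inr hK)]
    rfl
  · by_cases hM : M ≤ 0
    · have hinner : PySem.List.pyRange 0 M 1 = [] := PySem.List.pyRange_one_eq_nil hM
      unfold max_maciez max_maciez_alt
      rw [if_pos (Or.inl hM)]
      simp only [hinner, List.foldl_nil]
      exact pv_foldl_max_zero _ 0 le_rfl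
    · -- main case: M ≥ 1, K ≥ 1
      have hK0 : (0 : Int) ≤ N - M + 1 := by omega
      have hKpos : (0 : Int) < N - M + 1 := by omega
      unfold max_maciez max_maciez_alt
      rw [if_neg (by omega : ¬ (M ≤ 0 ∨ N - M + 1 ≤ 0))]
      rw [pv_acc_eq_dot (N - M + 1) M hK0 V C]
      have hA : (PySem.List.pyRange 0 (N - M + 1) 1).foldl
          (fun best start =>
            max best ((PySem.List.pyRange 0 M 1).foldl
              (fun mac i => mac + PySem.List.pyGetD V (start + i) 0 * PySem.List.pyGetD C i 0) 0)) 0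
          = ((PySem.List.pyRange 0 (N - M + 1) 1).map (pvDot M V C)).foldl max 0 := by
        rw [List.foldl_map]; rfl
      rw [hA]
      rw [PySem.List.pyRange_one_cons hKpos]
      simp only [List.map_cons, List.foldl_cons]
      rw [PySem.List.max?_id_cons]
      simp only [Option.getD_some]
      rw [pv_foldl_max_max]

-- ===== VERDICT (by name: the statement is the Claim_ definition above) =====
theorem max_maciez_spec : Claim_equal_max_maciez := by
  intro N M V C _ _
  unfold Spec_max_maciez
  exact max_maciez_spec_aux N M V C
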